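-- pv_equiv track=rewrite | github.com/googlefonts/googlefonts-project-template | venv/lib/python3.8/site-packages/fontParts/base/normalizers.py | normalizeGlyphOrder
-- ===== SOURCE A (Python) =====
-- from collections import Counter
--
-- def normalizeGlyphOrder(value):
--     """
--     Normalizes glyph order.
--
--     ** **value** must be a ``tuple`` or ``list``.
--     * **value** items must normalize as glyph names with
--       :func:`normalizeGlyphName`.
--     * **value** must not repeat glyph names.
--     * Returned value will be a ``tuple`` of unencoded ``unicode`` strings.
--     """
--     if not isinstance(value, (tuple, list)):
--         raise TypeError("Glyph order must be a list, not %s."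
--                         % type(value).__name__)
--     for v in value:
--         normalizeGlyphName(v)
--     duplicates = sorted(v for v, count in Counter(value).items() if count > 1)
--     if len(duplicates) != 0:
--         raise ValueError("Duplicate glyph names are not allowed. Glyph "
--                          "name(s) '%s' are duplicate." % ", ".join(duplicates))
--     return tuple(value)
--
-- def normalizeGlyphName(value):
--     """
--     Normalizes glyph name.
--
--     * **value** must be a :ref:`type-string`.
--     * **value** must be at least one character long.
--     * Returned value will be an unencoded ``unicode`` string.
--     """
--     if not isinstance(value, str):
--         raise TypeError("Glyph names must be strings, not %s."
--                         % type(value).__name__)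
--     if len(value) < 1:
--         raise ValueError("Glyph names must be at least one character long.")
--     return value
-- ===== SOURCE B (Python) =====
-- def normalizeGlyphOrder(value):
--     """
--     Normalizes glyph order.
--
--     Validate each name, then detect duplicates by sorting a copy and scanning
--     adjacent pairs (equal neighbours are duplicates; the scan emits each
--     duplicated name once, already in sorted order) - no Counter/hash table.
--     """
--     if not isinstance(value, (tuple, list)):
--         raise TypeError("Glyph order must be a list, not %s."
--                         % type(value).__name__)
--     for v in value:
--         if not isinstance(v, str):
--             raise TypeError("Glyph names must be strings, not %s."
--                             % type(v).__name__)
--         if len(v) < 1: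
--             raise ValueError("Glyph names must be at least one character long.")
--     ordered = sorted(value)
--     duplicates = []
--     for a, b in zip(ordered, ordered[1:]):
--         if a == b and (not duplicates or duplicates[-1] != b):
--             duplicates.append(b)
--     if duplicates:
--         raise ValueError("Duplicate glyph names are not allowed. Glyph "
--                          "name(s) '%s' are duplicate." % ", ".join(duplicates))
--     return tuple(value)
-- ===== Notes on version B (the rewrite author's own statement) =====
-- stated objective: alternative
-- what changed: Duplicate detection is done by sorting a copy and scanning adjacent pairs (equal neighbours, emitted once each, already in sorted order) instead of building a Counter hash table, filtering counts > 1 and sorting the survivors; validation is inlined in the first pass.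
import Mathlib
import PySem

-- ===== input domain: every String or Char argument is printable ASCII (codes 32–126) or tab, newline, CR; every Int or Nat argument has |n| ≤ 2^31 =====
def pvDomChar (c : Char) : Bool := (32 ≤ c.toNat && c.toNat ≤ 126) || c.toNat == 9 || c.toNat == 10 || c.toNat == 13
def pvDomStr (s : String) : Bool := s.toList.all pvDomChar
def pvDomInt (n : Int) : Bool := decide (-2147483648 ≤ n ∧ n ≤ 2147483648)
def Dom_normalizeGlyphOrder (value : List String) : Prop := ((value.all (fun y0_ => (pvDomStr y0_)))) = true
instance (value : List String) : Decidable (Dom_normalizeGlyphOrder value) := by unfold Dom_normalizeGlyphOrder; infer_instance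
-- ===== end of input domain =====

-- B detects duplicates by sorting a copy and scanning adjacent pairs instead of a Counter
-- table plus filter plus sort (objective: alternative); same return value and same errors.


-- ===== PORT A =====
-- normalizeGlyphName raises (returns none) on a name shorter than one character
def normalizeGlyphName? (v : String) : Option String :=
  if PySem.Str.len v < 1 then none else some v

def normalizeGlyphOrder (value : List String) : List String :=
  -- the 'for v in value: normalizeGlyphName(v)' loop; a raise is excluded by Pre_
  if value.any (fun v => (normalizeGlyphName? v).isNone) then []
  else
    let duplicates := PySem.List.sorted
      (((PySem.Dict.counter value).items.filter (fun p => p.2 > 1)).map (·.1))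
      (fun x => x) false
    if duplicates.length ≠ 0 then []   -- ValueError path, excluded by Pre_
    else value

-- ===== PORT B =====
def normalizeGlyphOrder_alt (value : List String) : List String :=
  -- validation loop (a raise is excluded by Pre_)
  if value.any (fun v => PySem.Str.len v < 1) then []
  else
    let ordered := PySem.List.sorted value (fun x => x) false
    -- 'for a, b in zip(ordered, ordered[1:])': adjacent-pair scan collecting duplicates
    let duplicates := (ordered.zip ordered.tail).foldl
      (fun (acc : List String) p =>
        if p.1 == p.2 && (acc.getLast? != some p.2) then acc ++ [p.2] else acc) []
    if duplicates ≠ [] then []   -- ValueError path, excluded by Pre_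
    else value

-- ===== PRECONDITION & SPEC =====
-- Pre_ excludes exactly the inputs where A raises: an empty glyph name (ValueError in
-- normalizeGlyphName) or a repeated glyph name (the duplicate ValueError).
def Pre_normalizeGlyphOrder (value : List String) : Prop :=
  (∀ s ∈ value, s ≠ "") ∧ value.Nodup

instance (value : List String) : Decidable (Pre_normalizeGlyphOrder value) := by
  unfold Pre_normalizeGlyphOrder; infer_instance

def pvWitness_normalizeGlyphOrder : List String := ["A", "B", "period"]

def Spec_normalizeGlyphOrder (value : List String) (out : List String) : Prop := out = normalizeGlyphOrder_alt value
instance (value : List String) (out : List String) : Decidable (Spec_normalizeGlyphOrder value out) := by unfold Spec_normalizeGlyphOrder; infer_instance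

-- ===== CLAIM (what is proved, stated in full; the proofs are below) =====
def Claim_equal_normalizeGlyphOrder : Prop := ∀ (value : List String), Dom_normalizeGlyphOrder value → Pre_normalizeGlyphOrder value → Spec_normalizeGlyphOrder value (normalizeGlyphOrder value)

-- ===== LEMMAS AND PROOFS =====

-- a nonempty-name test never fires under Pre_
theorem pv_len_ge_one {s : String} (h : s ≠ "") : ¬ PySem.Str.len s < 1 := by
  have h' : s.toList ≠ [] := by
    intro hc
    exact h (by simpa using congrArg String.ofList hc)
  simp [PySem.Str.len]
  omega

-- A returns value under Pre_
theorem pvA_eq (value : List String) (h : Pre_normalizeGlyphOrder value) :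
    normalizeGlyphOrder value = value := by
  obtain ⟨hne, hnd⟩ := h
  unfold normalizeGlyphOrder
  have hany : value.any (fun v => (normalizeGlyphName? v).isNone) = false := by
    simp only [List.any_eq_false]
    intro v hv
    simp only [normalizeGlyphName?, if_neg (pv_len_ge_one (hne v hv)), Option.isNone_some,
      Bool.false_eq_true, not_false_eq_true]
  rw [hany]
  simp only [Bool.false_eq_true, if_false]
  have hfil : ((PySem.Dict.counter value).items.filter (fun p => p.2 > 1)) = [] := by
    rw [PySem.Dict.items_counter, List.filter_map, List.map_eq_nil_iff, List.filter_eq_nil_iff]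
    intro k hk
    have hk' : k ∈ value := (PySem.Set.mem_ofList value k).mp hk
    have hc : value.count k = 1 := List.count_eq_one_of_mem hnd hk'
    simp [hc]
  rw [hfil]
  simp [PySem.List.sorted]

-- the adjacent-pair scan of a Nodup list collects nothing
theorem pv_adj_scan_nil (l : List String) (hnd : l.Nodup) :
    (l.zip l.tail).foldl
      (fun (acc : List String) p =>
        if p.1 == p.2 && (acc.getLast? != some p.2) then acc ++ [p.2] else acc) [] = [] := by
  induction l with
  | nil => simp
  | cons a t ih =>
    cases t with
    | nil => simp
    | cons b t' =>
      have hab : a ≠ b := by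
        have := (List.nodup_cons.mp hnd).1
        intro hc; exact this (hc ▸ List.mem_cons_self ..)
      simp only [List.tail_cons, List.zip_cons_cons, List.foldl_cons,
        beq_eq_false_iff_ne.mpr hab, Bool.false_and, Bool.false_eq_true, if_false]
      have := ih (List.nodup_cons.mp hnd).2
      simpa using this

-- B returns value under Pre_
theorem pvB_eq (value : List String) (h : Pre_normalizeGlyphOrder value) :
    normalizeGlyphOrder_alt value = value := by
  obtain ⟨hne, hnd⟩ := h
  unfold normalizeGlyphOrder_alt
  have hany : value.any (fun v => decide (PySem.Str.len v < 1)) = false := by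
    simp only [List.any_eq_false]
    intro v hv
    simpa using pv_len_ge_one (hne v hv)
  simp only [hany, Bool.false_eq_true, if_false]
  have hnds : (PySem.List.sorted value (fun x => x) false).Nodup :=
    (PySem.List.sorted_perm value (fun x => x) false).nodup_iff.mpr hnd
  rw [pv_adj_scan_nil _ hnds]
  simp

-- ===== VERDICT (by name: the statement is the Claim_ definition above) =====
theorem normalizeGlyphOrder_spec : Claim_equal_normalizeGlyphOrder := by
  intro value _ hpre
  unfold Spec_normalizeGlyphOrder
  rw [pvA_eq value hpre, pvB_eq value hpre]
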